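-- pv_equiv track=rewrite | github.com/y1zhou/ABCFold | abcfold/scripts/abc_script_utils.py | query_to_hit_mapping
-- ===== SOURCE A (Python) =====
-- from typing import Mapping, Optional, Union
--
-- def query_to_hit_mapping(
--     query_aligned: str, template_aligned: str
-- ) -> Mapping[int, int]:
--     """0-based query index to hit index mapping."""
--     query_to_hit_mapping_out = {}
--     hit_index = 0
--     query_index = 0
--     for q_char, t_char in zip(query_aligned, template_aligned):
--         # Gap inserted in the template
--         if q_char == "-":
--             query_index += 1
--         # Deleted residue in the template (would be a gap in the query).
--         elif t_char == "-":
--             hit_index += 1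
--         # Normal aligned residue, in both query and template. Add to mapping.
--         else:
--             query_to_hit_mapping_out[query_index] = hit_index
--             query_index += 1
--             hit_index += 1
--     return query_to_hit_mapping_out
-- ===== SOURCE B (Python) =====
-- def query_to_hit_mapping(query_aligned, template_aligned):
--     """0-based query index to hit index mapping (prefix-table formulation)."""
--     pairs = list(zip(query_aligned, template_aligned))
--     # qi[i] / hi[i] = query / hit index at the start of column i (prefix sums of per-column deltas)
--     qi, hi = [0], [0]
--     for q, t in pairs:
--         qi.append(qi[-1] + (0 if (q != "-" and t == "-") else 1))
--         hi.append(hi[-1] + (1 if q != "-" else 0))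
--     return {qi[i]: hi[i] for i, (q, t) in enumerate(pairs) if q != "-" and t != "-"}
-- ===== Notes on version B (the rewrite author's own statement) =====
-- stated objective: alternative
-- what changed: Replaces the single stateful counting loop (two mutable counters updated branch-by-branch while inserting) with precomputed prefix-index tables qi/hi built from per-column deltas, followed by a separate filtered selection pass over the enumerated columns.
import Mathlib
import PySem

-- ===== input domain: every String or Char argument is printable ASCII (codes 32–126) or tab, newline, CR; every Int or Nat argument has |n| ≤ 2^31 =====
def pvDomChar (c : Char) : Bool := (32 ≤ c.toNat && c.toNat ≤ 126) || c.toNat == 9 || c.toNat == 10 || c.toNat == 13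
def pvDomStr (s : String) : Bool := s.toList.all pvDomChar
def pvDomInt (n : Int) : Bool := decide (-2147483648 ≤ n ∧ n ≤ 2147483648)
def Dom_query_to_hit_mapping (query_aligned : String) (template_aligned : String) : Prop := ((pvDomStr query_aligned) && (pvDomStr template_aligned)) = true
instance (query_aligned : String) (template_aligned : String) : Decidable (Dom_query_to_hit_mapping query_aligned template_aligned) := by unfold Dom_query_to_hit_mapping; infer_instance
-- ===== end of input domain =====

-- B replaces A's single stateful counting loop with prefix-index tables plus a filtered
-- selection pass (alternative decomposition, same O(n) cost); return values proved equal.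

-- ===== PORT A =====
-- loop body of A: state is (dict, hit_index, query_index)
def pvStepA (st : PySem.Dict Int Int × Int × Int) (p : Char × Char) :
    PySem.Dict Int Int × Int × Int :=
  if p.1 = '-' then (st.1, st.2.1, st.2.2 + 1)
  else if p.2 = '-' then (st.1, st.2.1 + 1, st.2.2)
  else (st.1.insert st.2.2 st.2.1, st.2.1 + 1, st.2.2 + 1)

def query_to_hit_mapping (query_aligned : String) (template_aligned : String) : List (Int × Int) :=
  (((query_aligned.toList.zip template_aligned.toList).foldl pvStepA
      (PySem.Dict.empty, 0, 0)).1).items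

-- ===== PORT B =====
-- loop body of B's prefix-table construction: qi.append(qi[-1] + dq); hi.append(hi[-1] + dh)
def pvStepTbl (st : List Int × List Int) (p : Char × Char) : List Int × List Int :=
  (st.1 ++ [PySem.List.pyGetD st.1 (-1) 0 + (if p.1 ≠ '-' ∧ p.2 = '-' then 0 else 1)],
   st.2 ++ [PySem.List.pyGetD st.2 (-1) 0 + (if p.1 ≠ '-' then 1 else 0)])

-- loop body of B's dict comprehension over enumerate(pairs)
def pvStepSel (qi hi : List Int) (d : PySem.Dict Int Int) (ip : Int × Char × Char) :
    PySem.Dict Int Int :=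
  if ip.2.1 ≠ '-' ∧ ip.2.2 ≠ '-' then
    d.insert (PySem.List.pyGetD qi ip.1 0) (PySem.List.pyGetD hi ip.1 0)
  else d

-- the two prefix tables (qi, hi) built by B's first loop
def pvTables (pairs : List (Char × Char)) : List Int × List Int :=
  pairs.foldl pvStepTbl ([0], [0])

def query_to_hit_mapping_alt (query_aligned : String) (template_aligned : String) : List (Int × Int) :=
  ((PySem.List.enumerate (query_aligned.toList.zip template_aligned.toList) 0).foldl
      (pvStepSel (pvTables (query_aligned.toList.zip template_aligned.toList)).1
                 (pvTables (query_aligned.toList.zip template_aligned.toList)).2)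
      PySem.Dict.empty).items

-- ===== PRECONDITION & SPEC =====
def Spec_query_to_hit_mapping (query_aligned : String) (template_aligned : String) (out : List (Int × Int)) : Prop := out = query_to_hit_mapping_alt query_aligned template_aligned
instance (query_aligned : String) (template_aligned : String) (out : List (Int × Int)) : Decidable (Spec_query_to_hit_mapping query_aligned template_aligned out) := by unfold Spec_query_to_hit_mapping; infer_instance

-- ===== CLAIM (what is proved, stated in full; the proofs are below) =====
def Claim_equal_query_to_hit_mapping : Prop := ∀ (query_aligned : String) (template_aligned : String), Dom_query_to_hit_mapping query_aligned template_aligned → Spec_query_to_hit_mapping query_aligned template_aligned (query_to_hit_mapping query_aligned template_aligned)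

-- ===== LEMMAS AND PROOFS =====

-- per-column deltas of B
def pvDq (p : Char × Char) : Int := if p.1 ≠ '-' ∧ p.2 = '-' then 0 else 1
def pvDh (p : Char × Char) : Int := if p.1 ≠ '-' then 1 else 0

-- the common value of both programs: the recorded (query_index, hit_index) pairs, in order
def pvSpecL : List (Char × Char) → Int → Int → List (Int × Int)
  | [], _, _ => []
  | p :: rest, q, h =>
    if p.1 = '-' then pvSpecL rest (q + 1) h
    else if p.2 = '-' then pvSpecL rest q (h + 1)
    else (q, h) :: pvSpecL rest (q + 1) (h + 1)

-- prefix list of partial sums of f, starting after value v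
def pvPref (f : Char × Char → Int) : Int → List (Char × Char) → List Int
  | _, [] => []
  | v, p :: rest => (v + f p) :: pvPref f (v + f p) rest

lemma pvBuild_pref (f : Char × Char → Int) :
    ∀ (l : List (Char × Char)) (acc : List Int) (x : Int),
    l.foldl (fun s p => s ++ [PySem.List.pyGetD s (-1) 0 + f p]) (acc ++ [x])
      = acc ++ [x] ++ pvPref f x l := by
  intro l
  induction l with
  | nil => intro acc x; simp [pvPref]
  | cons p rest ih =>
      intro acc x
      simp only [List.foldl_cons, PySem.List.pyGetD_neg_one_append_singleton, pvPref]
      have := ih (acc ++ [x]) (x + f p)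
      simpa [List.append_assoc] using this

lemma pvGetD_pref (f : Char × Char → Int) :
    ∀ (l : List (Char × Char)) (v : Int) (j : Nat), j ≤ l.length →
    PySem.List.pyGetD (v :: pvPref f v l) ((j : Nat) : Int) 0
      = v + ((l.take j).map f).sum := by
  intro l
  induction l with
  | nil =>
      intro v j hj
      have hj0 : j = 0 := Nat.le_zero.mp hj
      subst hj0
      simp
  | cons p rest ih =>
      intro v j hj
      cases j with
      | zero => simp
      | succ j =>
          have h := ih (v + f p) j (by simpa using hj)
          simp only [pvPref]
          simp only [PySem.List.pyGetD_natCast] at h ⊢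
          simpa [List.getD, add_assoc] using h

lemma pvA_items :
    ∀ (l : List (Char × Char)) (d : PySem.Dict Int Int) (h q : Int),
    d.keys.Nodup → (∀ k ∈ d.keys, k < q) →
    ((l.foldl pvStepA (d, h, q)).1).items = d.items ++ pvSpecL l q h := by
  intro l
  induction l with
  | nil => intro d h q _ _; simp [pvSpecL]
  | cons p rest ih =>
      intro d h q hnd hlt
      rw [List.foldl_cons]
      by_cases hq : p.1 = '-'
      · have hstep : pvStepA (d, h, q) p = (d, h, q + 1) := by simp [pvStepA, hq]
        rw [hstep, ih d h (q + 1) hnd (fun k hk => by have := hlt k hk; omega)]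
        simp only [pvSpecL]
        rw [if_pos hq]
      · by_cases ht : p.2 = '-'
        · have hstep : pvStepA (d, h, q) p = (d, h + 1, q) := by simp [pvStepA, hq, ht]
          rw [hstep, ih d (h + 1) q hnd hlt]
          simp only [pvSpecL]
          rw [if_neg hq, if_pos ht]
        · have hcon : d.contains q = false := by
            rw [PySem.Dict.contains_eq_decide_mem_keys]
            simp only [decide_eq_false_iff_not]
            intro hmem; have := hlt q hmem; omega
          have hstep : pvStepA (d, h, q) p = (d.insert q h, h + 1, q + 1) := by
            simp [pvStepA, hq, ht]
          rw [hstep, ih (d.insert q h) (h + 1) (q + 1)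
              (PySem.Dict.nodup_keys_insert d q h hnd)
              (by intro k hk
                  rw [PySem.Dict.keys_insert_of_not_contains d h hcon] at hk
                  rcases List.mem_append.1 hk with h1 | h1
                  · have := hlt k h1; omega
                  · simp at h1; omega)]
          rw [PySem.Dict.items_insert_of_not_contains d h hcon]
          simp only [pvSpecL]
          rw [if_neg hq, if_neg ht]
          simp

lemma pvB_items (qi hi : List Int) :
    ∀ (l : List (Char × Char)) (s : Int) (d : PySem.Dict Int Int) (q h : Int),
    d.keys.Nodup → (∀ k ∈ d.keys, k < q) →
    (∀ j : Nat, j < l.length →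
        PySem.List.pyGetD qi (s + (j : Int)) 0 = q + ((l.take j).map pvDq).sum) →
    (∀ j : Nat, j < l.length →
        PySem.List.pyGetD hi (s + (j : Int)) 0 = h + ((l.take j).map pvDh).sum) →
    ((PySem.List.enumerate l s).foldl (pvStepSel qi hi) d).items
      = d.items ++ pvSpecL l q h := by
  intro l
  induction l with
  | nil => intro s d q h _ _ _ _; simp [PySem.List.enumerate, pvSpecL]
  | cons p rest ih =>
      intro s d q h hnd hlt hqi hhi
      rw [PySem.List.enumerate_cons, List.foldl_cons]
      have hqi' : ∀ j : Nat, j < rest.length →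
          PySem.List.pyGetD qi ((s + 1) + (j : Int)) 0
            = (q + pvDq p) + ((rest.take j).map pvDq).sum := by
        intro j hj
        have hg := hqi (j + 1) (by simpa using Nat.succ_lt_succ hj)
        push_cast at hg ⊢
        rw [show s + 1 + (j : Int) = s + ((j : Int) + 1) by ring, hg]
        simp [List.take_succ_cons]
        ring
      have hhi' : ∀ j : Nat, j < rest.length →
          PySem.List.pyGetD hi ((s + 1) + (j : Int)) 0
            = (h + pvDh p) + ((rest.take j).map pvDh).sum := by
        intro j hj
        have hg := hhi (j + 1) (by simpa using Nat.succ_lt_succ hj)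
        push_cast at hg ⊢
        rw [show s + 1 + (j : Int) = s + ((j : Int) + 1) by ring, hg]
        simp [List.take_succ_cons]
        ring
      by_cases hq : p.1 = '-'
      · have hstep : pvStepSel qi hi d (s, p) = d := by simp [pvStepSel, hq]
        have hdq : pvDq p = 1 := by simp [pvDq, hq]
        have hdh : pvDh p = 0 := by simp [pvDh, hq]
        rw [hstep, ih (s + 1) d (q + 1) h hnd (fun k hk => by have := hlt k hk; omega)
          (by intro j hj; have := hqi' j hj; rw [this, hdq])
          (by intro j hj; have := hhi' j hj; rw [this, hdh]; ring_nf)]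
        simp only [pvSpecL]
        rw [if_pos hq]
      · by_cases ht : p.2 = '-'
        · have hstep : pvStepSel qi hi d (s, p) = d := by simp [pvStepSel, ht]
          have hdq : pvDq p = 0 := by simp [pvDq, hq, ht]
          have hdh : pvDh p = 1 := by simp [pvDh, hq]
          rw [hstep, ih (s + 1) d q (h + 1) hnd hlt
            (by intro j hj; have := hqi' j hj; rw [this, hdq]; ring_nf)
            (by intro j hj; have := hhi' j hj; rw [this, hdh])]
          simp only [pvSpecL]
          rw [if_neg hq, if_pos ht]
        · have hq0 : PySem.List.pyGetD qi (s + ((0 : Nat) : Int)) 0 = q := by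
            have := hqi 0 (by simp)
            simpa using this
          have hh0 : PySem.List.pyGetD hi (s + ((0 : Nat) : Int)) 0 = h := by
            have := hhi 0 (by simp)
            simpa using this
          have hstep : pvStepSel qi hi d (s, p) = d.insert q h := by
            simp only [pvStepSel, if_pos (And.intro hq ht)]
            simpa using congrArg₂ d.insert hq0 hh0
          have hcon : d.contains q = false := by
            rw [PySem.Dict.contains_eq_decide_mem_keys]
            simp only [decide_eq_false_iff_not]
            intro hmem; have := hlt q hmem; omega
          have hdq : pvDq p = 1 := by simp [pvDq, hq, ht]
          have hdh : pvDh p = 1 := by simp [pvDh, hq]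
          rw [hstep, ih (s + 1) (d.insert q h) (q + 1) (h + 1)
            (PySem.Dict.nodup_keys_insert d q h hnd)
            (by intro k hk
                rw [PySem.Dict.keys_insert_of_not_contains d h hcon] at hk
                rcases List.mem_append.1 hk with h1 | h1
                · have := hlt k h1; omega
                · simp at h1; omega)
            (by intro j hj; have := hqi' j hj; rw [this, hdq])
            (by intro j hj; have := hhi' j hj; rw [this, hdh])]
          rw [PySem.Dict.items_insert_of_not_contains d h hcon]
          simp only [pvSpecL]
          rw [if_neg hq, if_neg ht]
          simp

lemma pvTables_eq (l : List (Char × Char)) :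
    pvTables l = (0 :: pvPref pvDq 0 l, 0 :: pvPref pvDh 0 l) := by
  have h := PySem.List.foldl_prod_mk
    (fun (s : List Int) (p : Char × Char) => s ++ [PySem.List.pyGetD s (-1) 0 + pvDq p])
    (fun (s : List Int) (p : Char × Char) => s ++ [PySem.List.pyGetD s (-1) 0 + pvDh p])
    l [0] [0]
  have hfun : pvStepTbl = fun (st : List Int × List Int) (p : Char × Char) =>
      ((fun (s : List Int) (p : Char × Char) => s ++ [PySem.List.pyGetD s (-1) 0 + pvDq p]) st.1 p,
       (fun (s : List Int) (p : Char × Char) => s ++ [PySem.List.pyGetD s (-1) 0 + pvDh p]) st.2 p) := by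
    funext st p
    simp only [pvStepTbl, pvDq, pvDh]
  unfold pvTables
  rw [hfun, h, Prod.mk.injEq]
  exact ⟨by simpa using pvBuild_pref pvDq l [] 0,
         by simpa using pvBuild_pref pvDh l [] 0⟩

-- ===== VERDICT (by name: the statement is the Claim_ definition above) =====
theorem query_to_hit_mapping_spec : Claim_equal_query_to_hit_mapping := by
  intro qa ta _
  unfold Spec_query_to_hit_mapping query_to_hit_mapping query_to_hit_mapping_alt
  rw [pvTables_eq]
  rw [pvA_items (qa.toList.zip ta.toList) PySem.Dict.empty 0 0 (by simp) (by simp)]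
  rw [pvB_items (0 :: pvPref pvDq 0 (qa.toList.zip ta.toList))
      (0 :: pvPref pvDh 0 (qa.toList.zip ta.toList))
      (qa.toList.zip ta.toList) 0 PySem.Dict.empty 0 0
      (by simp) (by simp)
      (by intro j hj
          have := pvGetD_pref pvDq (qa.toList.zip ta.toList) 0 j (Nat.le_of_lt hj)
          simpa using this)
      (by intro j hj
          have := pvGetD_pref pvDh (qa.toList.zip ta.toList) 0 j (Nat.le_of_lt hj)
          simpa using this)]
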